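-- pv_equiv track=rewrite | github.com/jiaqchen/whereami-text2sgm | baselines/CLIP-to-CLIP/run_clip_on_text.py | sum_over_all_sentence_scenes
-- ===== SOURCE A (Python) =====
-- def sum_over_all_sentence_scenes(time, all_sentence_scenes):
--     scene_time = {}
--     seen_scenes = []
--     for i, scene in enumerate(all_sentence_scenes):
--         if scene not in seen_scenes:
--             seen_scenes.append(scene)
--             scene_indices = [j for j, s in enumerate(all_sentence_scenes) if s == scene]
--             temp_time = [time[scene_ind] for scene_ind in scene_indices]
--             scene_time[scene] = sum(temp_time)
--     return list(scene_time.values()), [1 for _ in scene_time.keys()]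
-- ===== SOURCE B (Python) =====
-- def sum_over_all_sentence_scenes(time, all_sentence_scenes):
--     totals = {}
--     for t, scene in zip(time, all_sentence_scenes):
--         totals[scene] = totals.get(scene, 0) + t
--     return list(totals.values()), [1] * len(totals)
-- ===== Notes on version B (the rewrite author's own statement) =====
-- stated objective: faster
-- what changed: Replaces the per-scene rescan of the whole list (membership test in a seen-list plus an inner index scan per new scene) with a single pass that accumulates sums in a dict keyed by scene.
import Mathlib
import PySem

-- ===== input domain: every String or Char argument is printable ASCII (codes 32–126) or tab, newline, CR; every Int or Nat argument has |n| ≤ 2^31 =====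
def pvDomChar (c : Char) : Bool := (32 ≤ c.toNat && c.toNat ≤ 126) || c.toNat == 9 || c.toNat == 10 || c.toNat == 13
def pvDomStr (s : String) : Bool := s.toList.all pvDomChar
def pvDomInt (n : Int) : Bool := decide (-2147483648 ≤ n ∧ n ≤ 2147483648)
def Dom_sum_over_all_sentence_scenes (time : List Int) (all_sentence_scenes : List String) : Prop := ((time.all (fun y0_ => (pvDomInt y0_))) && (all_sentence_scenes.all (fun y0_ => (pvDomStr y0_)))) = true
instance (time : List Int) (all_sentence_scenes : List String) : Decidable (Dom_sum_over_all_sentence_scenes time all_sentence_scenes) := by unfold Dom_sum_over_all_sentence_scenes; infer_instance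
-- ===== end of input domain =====

-- B replaces A's per-new-scene rescan of the whole list by one accumulating pass over
-- zip(time, scenes) into a dict keyed by scene (objective: faster, asymptotic).

-- ===== PORT A =====
-- literal port of A: for each first occurrence of a scene, rescan the whole list for its
-- indices and sum time at those indices.  time[scene_ind] is in range for every input in
-- Pre_ (len(scenes) ≤ len(time)); outside Pre_ Python raises IndexError, so pyGetD's
-- default is never relevant to the claim.
def sum_over_all_sentence_scenes (time : List Int) (all_sentence_scenes : List String) : List Int × List Int :=
  let st := (PySem.List.enumerate all_sentence_scenes).foldl
    (fun (st : PySem.Dict String Int × List String) p =>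
      if st.2.contains p.2 then st
      else
        let scene_indices := ((PySem.List.enumerate all_sentence_scenes).filter (fun q => q.2 == p.2)).map (·.1)
        let temp_time := scene_indices.map (fun j => PySem.List.pyGetD time j 0)
        (st.1.insert p.2 temp_time.sum, st.2 ++ [p.2]))
    (PySem.Dict.empty, [])
  (st.1.values, st.1.keys.map (fun _ => (1 : Int)))

-- ===== PORT B =====
def sum_over_all_sentence_scenes_alt (time : List Int) (all_sentence_scenes : List String) : List Int × List Int :=
  let totals := (time.zip all_sentence_scenes).foldl
    (fun (d : PySem.Dict String Int) p => d.insert p.2 (d.getD p.2 0 + p.1)) PySem.Dict.empty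
  (totals.values, List.replicate totals.size 1)

-- ===== PRECONDITION & SPEC =====
-- A indexes time at every index of all_sentence_scenes, so it raises IndexError whenever
-- all_sentence_scenes is longer than time; exactly those inputs are excluded.
def Pre_sum_over_all_sentence_scenes (time : List Int) (all_sentence_scenes : List String) : Prop :=
  all_sentence_scenes.length ≤ time.length
instance (time : List Int) (all_sentence_scenes : List String) : Decidable (Pre_sum_over_all_sentence_scenes time all_sentence_scenes) := by unfold Pre_sum_over_all_sentence_scenes; infer_instance

def pvWitness_sum_over_all_sentence_scenes : List Int × List String := ([3, 4, 5], ["a", "b", "a"])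

def Spec_sum_over_all_sentence_scenes (time : List Int) (all_sentence_scenes : List String) (out : List Int × List Int) : Prop := out = sum_over_all_sentence_scenes_alt time all_sentence_scenes
instance (time : List Int) (all_sentence_scenes : List String) (out : List Int × List Int) : Decidable (Spec_sum_over_all_sentence_scenes time all_sentence_scenes out) := by unfold Spec_sum_over_all_sentence_scenes; infer_instance

-- ===== CLAIM (what is proved, stated in full; the proofs are below) =====
def Claim_equal_sum_over_all_sentence_scenes : Prop := ∀ (time : List Int) (all_sentence_scenes : List String), Dom_sum_over_all_sentence_scenes time all_sentence_scenes → Pre_sum_over_all_sentence_scenes time all_sentence_scenes → Spec_sum_over_all_sentence_scenes time all_sentence_scenes (sum_over_all_sentence_scenes time all_sentence_scenes)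


-- ===== LEMMAS AND PROOFS =====

-- the per-scene total both programs compute (B's form: over zip)
def pvVal (time : List Int) (scenes : List String) (s : String) : Int :=
  (((time.zip scenes).filter (fun p => p.2 == s)).map (·.1)).sum

-- B's accumulation computes pvVal
theorem pvB_getD (l : List (Int × String)) (d : PySem.Dict String Int) (s : String) :
    (l.foldl (fun d p => d.insert p.2 (d.getD p.2 0 + p.1)) d).getD s 0
      = d.getD s 0 + ((l.filter (fun p => p.2 == s)).map (·.1)).sum := by
  induction l generalizing d with
  | nil => simp
  | cons x t ih =>
    simp only [List.foldl_cons, List.filter_cons]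
    by_cases h : x.2 = s
    · simp [h, ih]
      ring
    · have hb : (x.2 == s) = false := by simp [h]
      have hne : s ≠ x.2 := fun hs => h hs.symm
      simp [hb, ih, PySem.Dict.getD_insert, hne]

-- A's inner rescan computes pvVal too (indices in range)
theorem pvEnum_map (scenes : List String) (time : List Int) (s : Nat)
    (h : s + scenes.length ≤ time.length) :
    (PySem.List.enumerate scenes (s : Int)).map (fun q => (PySem.List.pyGetD time q.1 0, q.2))
      = (time.drop s).zip scenes := by
  induction scenes generalizing s with
  | nil => simp [PySem.List.enumerate]
  | cons x xs ih =>
    have hs : s < time.length := by simp at h; omega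
    rw [PySem.List.enumerate_cons]
    have hdrop : time.drop s = time[s] :: time.drop (s + 1) := (List.getElem_cons_drop hs).symm
    have hcast : ((s : Int) + 1) = ((s + 1 : Nat) : Int) := by push_cast; ring
    simp only [List.map_cons, hcast, ih (s + 1) (by simp at h ⊢; omega), hdrop, List.zip_cons_cons]
    congr 1
    simp [PySem.List.pyGetD_natCast, hs]

theorem pvA_val (scenes : List String) (time : List Int) (h : scenes.length ≤ time.length) (s : String) :
    ((((PySem.List.enumerate scenes).filter (fun q => q.2 == s)).map (·.1)).map
        (fun j => PySem.List.pyGetD time j 0)).sum = pvVal time scenes s := by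
  have he : (PySem.List.enumerate scenes 0).map (fun q => (PySem.List.pyGetD time q.1 0, q.2))
      = time.zip scenes := by
    have := pvEnum_map scenes time 0 (by omega)
    simpa using this
  unfold pvVal
  rw [← he, List.filter_map, List.map_map, List.map_map]
  simp [Function.comp_def]

-- A's outer loop: seen stays Nodup, the dict's items are seen paired with the value function
theorem pvA_fold (v : String → Int) (l : List (Int × String)) (d : PySem.Dict String Int)
    (seen : List String) (hnd : seen.Nodup) (hit : d.items = seen.map (fun s => (s, v s))) :
    (l.foldl (fun st p => if st.2.contains p.2 then st else
        (st.1.insert p.2 (v p.2), st.2 ++ [p.2])) (d, seen)).2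
        = PySem.Set.update seen (l.map (·.2))
    ∧ (l.foldl (fun st p => if st.2.contains p.2 then st else
        (st.1.insert p.2 (v p.2), st.2 ++ [p.2])) (d, seen)).1.items
        = (PySem.Set.update seen (l.map (·.2))).map (fun s => (s, v s))
    ∧ (PySem.Set.update seen (l.map (·.2))).Nodup := by
  induction l generalizing d seen with
  | nil => simpa [PySem.Set.update] using ⟨hit, hnd⟩
  | cons x t ih =>
    simp only [List.foldl_cons, List.map_cons]
    have hupd : PySem.Set.update seen (x.2 :: t.map (·.2))
        = PySem.Set.update (PySem.Set.add seen x.2) (t.map (·.2)) := by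
      simp [PySem.Set.update]
    by_cases hc : seen.contains x.2 = true
    · have hmemy : x.2 ∈ seen := by simpa using hc
      have hadd : PySem.Set.add seen x.2 = seen := by simp [PySem.Set.add, hmemy]
      rw [hupd, hadd, if_pos hc]
      exact ih d seen hnd hit
    · have hcf : seen.contains x.2 = false := by simpa using hc
      have hmem : x.2 ∉ seen := by simpa using hcf
      have hadd : PySem.Set.add seen x.2 = seen ++ [x.2] := by simp [PySem.Set.add, hmem]
      have hnd' : (seen ++ [x.2]).Nodup := by
        simp [List.nodup_append, hnd]
        exact fun a ha hax => hmem (hax ▸ ha)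
      have hkeys : d.keys = seen := by simp [PySem.Dict.keys, hit, Function.comp_def]
      have hfresh : d.contains x.2 = false := by
        by_contra hcon
        have hk : x.2 ∈ d.keys := (PySem.Dict.contains_iff_mem_keys d x.2).mp (by simpa using hcon)
        exact hmem (hkeys ▸ hk)
      have hins : (d.insert x.2 (v x.2)).items = d.items ++ [(x.2, v x.2)] := by
        have := PySem.Dict.items_foldl_insert_fresh (l := [x]) (k := fun p => p.2)
          (v := fun p => v p.2) (d := d) (by simpa using hfresh) (by simp)
        simpa using this
      have hit' : (d.insert x.2 (v x.2)).items = (seen ++ [x.2]).map (fun s => (s, v s)) := by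
        simp [hins, hit]
      rw [hupd, hadd, if_neg hc]
      exact ih (d.insert x.2 (v x.2)) (seen ++ [x.2]) hnd' hit'

-- ===== VERDICT (by name: the statement is the Claim_ definition above) =====
theorem sum_over_all_sentence_scenes_spec : Claim_equal_sum_over_all_sentence_scenes := by
  intro time scenes _ hpre
  have hlen : scenes.length ≤ time.length := hpre
  unfold Spec_sum_over_all_sentence_scenes sum_over_all_sentence_scenes sum_over_all_sentence_scenes_alt
  obtain ⟨_, hitems, _⟩ := pvA_fold
    (fun s => ((((PySem.List.enumerate scenes).filter (fun q => q.2 == s)).map (·.1)).map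
      (fun j => PySem.List.pyGetD time j 0)).sum)
    (PySem.List.enumerate scenes) PySem.Dict.empty [] List.nodup_nil rfl
  rw [PySem.List.map_snd_enumerate] at hitems
  have hde : PySem.Set.update ([] : List String) scenes = PySem.Set.ofList scenes :=
    PySem.Set.update_empty scenes
  rw [hde] at hitems
  have hkeysB : ((time.zip scenes).foldl
      (fun (d : PySem.Dict String Int) p => d.insert p.2 (d.getD p.2 0 + p.1)) PySem.Dict.empty).keys
      = PySem.Set.ofList scenes := by
    rw [PySem.Dict.keys_foldl_insert_key (time.zip scenes) (fun p => p.2)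
      (fun d p => d.getD p.2 0 + p.1) PySem.Dict.empty]
    have : (time.zip scenes).map (fun p => p.2) = scenes := List.map_snd_zip hlen
    rw [this]
    simpa using hde
  have hndB : ((time.zip scenes).foldl
      (fun (d : PySem.Dict String Int) p => d.insert p.2 (d.getD p.2 0 + p.1)) PySem.Dict.empty).keys.Nodup := by
    rw [hkeysB]; exact PySem.Set.nodup_ofList scenes
  have hitemsB := PySem.Dict.items_eq_map_keys _ hndB 0
  rw [hkeysB] at hitemsB
  have hvalB : ∀ s, ((time.zip scenes).foldl
      (fun (d : PySem.Dict String Int) p => d.insert p.2 (d.getD p.2 0 + p.1)) PySem.Dict.empty).getD s 0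
      = pvVal time scenes s := by
    intro s; rw [pvB_getD]; simp [pvVal]
  simp only [PySem.Dict.values, PySem.Dict.keys, PySem.Dict.size]
  rw [hitems, hitemsB]
  simp only [List.map_map, Function.comp_def, List.length_map, Prod.mk.injEq]
  constructor
  · exact List.map_congr_left (fun s _ => by rw [hvalB s, ← pvA_val scenes time hlen s]; simp [List.map_map, Function.comp_def])
  · simp [List.map_const']
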